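-- pv_equiv track=rewrite | github.com/mind-protocol/ngram | ngram/repair_core.py | parse_decisions_from_output
-- ===== SOURCE A (Python) =====
-- from typing import Any, Awaitable, Callable, Dict, List, Optional
--
-- def parse_decisions_from_output(output: str) -> List[Dict[str, str]]:
--     """Parse DECISION items from agent output."""
--     decisions = []
--     lines = output.split('\n')
--     current_decision = None
--
--     for line in lines:
--         stripped = line.strip()
--
--         if '### DECISION:' in stripped or '### Decision:' in stripped:
--             if current_decision and current_decision.get('name'):
--                 decisions.append(current_decision)
--             name = stripped.split(':', 1)[1].strip() if ':' in stripped else ''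
--             current_decision = {'name': name, 'conflict': '', 'resolution': '', 'reasoning': ''}
--         elif current_decision:
--             lower = stripped.lower()
--             if lower.startswith('- conflict:') or lower.startswith('conflict:'):
--                 current_decision['conflict'] = stripped.split(':', 1)[1].strip()
--             elif lower.startswith('- resolution:') or lower.startswith('resolution:'):
--                 current_decision['resolution'] = stripped.split(':', 1)[1].strip()
--             elif lower.startswith('- reasoning:') or lower.startswith('reasoning:'):
--                 current_decision['reasoning'] = stripped.split(':', 1)[1].strip()
--             elif lower.startswith('- updated:') or lower.startswith('updated:'):
--                 current_decision['updated'] = stripped.split(':', 1)[1].strip()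
--             elif stripped.startswith('###') or stripped.startswith('## '):
--                 if current_decision.get('name'):
--                     decisions.append(current_decision)
--                 current_decision = None
--
--     if current_decision and current_decision.get('name'):
--         decisions.append(current_decision)
--
--     return decisions
-- ===== SOURCE B (Python) =====
-- def _is_header(s):
--     return '### DECISION:' in s or '### Decision:' in s
--
--
-- def _after_colon(s):
--     return s.split(':', 1)[1].strip()
--
--
-- def parse_decisions_from_output(output):
--     """Parse DECISION items from agent output (two nested loops: skip to a
--     header, then consume that header's block)."""
--     lines = output.split('\n')
--     n = len(lines)
--     decisions = []
--     i = 0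
--     while i < n:
--         s = lines[i].strip()
--         i += 1
--         if not _is_header(s):
--             continue
--         d = {'name': _after_colon(s), 'conflict': '', 'resolution': '', 'reasoning': ''}
--         while i < n:
--             t = lines[i].strip()
--             if _is_header(t):
--                 break
--             i += 1
--             low = t.lower()
--             if low.startswith('- conflict:') or low.startswith('conflict:'):
--                 d['conflict'] = _after_colon(t)
--             elif low.startswith('- resolution:') or low.startswith('resolution:'):
--                 d['resolution'] = _after_colon(t)
--             elif low.startswith('- reasoning:') or low.startswith('reasoning:'):
--                 d['reasoning'] = _after_colon(t)
--             elif low.startswith('- updated:') or low.startswith('updated:'):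
--                 d['updated'] = _after_colon(t)
--             elif t.startswith('###') or t.startswith('## '):
--                 break
--         if d['name']:
--             decisions.append(d)
--     return decisions
-- ===== Notes on version B (the rewrite author's own statement) =====
-- stated objective: alternative
-- what changed: A's single loop threading an Optional current-decision state through every line is replaced by two nested loops: an outer scan that skips to each DECISION header and an inner scan that consumes that header's block.
import Mathlib
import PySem

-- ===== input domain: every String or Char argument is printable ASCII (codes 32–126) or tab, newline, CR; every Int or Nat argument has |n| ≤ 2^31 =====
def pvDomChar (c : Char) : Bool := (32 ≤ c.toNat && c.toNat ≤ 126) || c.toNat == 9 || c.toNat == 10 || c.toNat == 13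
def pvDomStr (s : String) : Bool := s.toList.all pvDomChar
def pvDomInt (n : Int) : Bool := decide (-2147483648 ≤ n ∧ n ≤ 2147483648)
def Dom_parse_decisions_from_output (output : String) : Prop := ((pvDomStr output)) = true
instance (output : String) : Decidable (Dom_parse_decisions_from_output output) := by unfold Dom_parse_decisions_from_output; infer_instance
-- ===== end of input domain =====

-- B replaces A's single stateful loop (Option "current decision" threaded through every line)
-- by two nested loops — skip to a DECISION header, then consume that header's block; same output.

-- ===== PORT A =====
-- port of "stripped.split(':', 1)[1].strip()" (total form: the [1] element exists wherever
-- either Python evaluates this, since a ':' is then present, so the '.getD 1 ""' default is never reached)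
def pvAfterColon (s : String) : String :=
  PySem.Str.strip (((PySem.Str.splitMax? s ":" 1).getD []).getD 1 "")

-- "if current_decision and current_decision.get('name'): decisions.append(current_decision)"
def pvFlush (st : List (PySem.Dict String String) × Option (PySem.Dict String String)) :
    List (PySem.Dict String String) :=
  match st.2 with
  | some cd => if PySem.Dict.getD cd "name" "" ≠ "" then st.1 ++ [cd] else st.1
  | none => st.1

-- one step of A's for-loop; state = (decisions, current_decision)
def pvAStep (st : List (PySem.Dict String String) × Option (PySem.Dict String String))
    (line : String) : List (PySem.Dict String String) × Option (PySem.Dict String String) :=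
  let stripped := PySem.Str.strip line
  if PySem.Str.isIn "### DECISION:" stripped || PySem.Str.isIn "### Decision:" stripped then
    let decisions := pvFlush st
    let name := if PySem.Str.isIn ":" stripped then pvAfterColon stripped else ""
    (decisions,
     some (PySem.Dict.mk [("name", name), ("conflict", ""), ("resolution", ""), ("reasoning", "")]))
  else
    match st.2 with
    | none => st
    | some cd =>
      let lower := PySem.Str.lower stripped
      if PySem.Str.startswith lower "- conflict:" || PySem.Str.startswith lower "conflict:" then
        (st.1, some (PySem.Dict.insert cd "conflict" (pvAfterColon stripped)))
      else if PySem.Str.startswith lower "- resolution:" || PySem.Str.startswith lower "resolution:" then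
        (st.1, some (PySem.Dict.insert cd "resolution" (pvAfterColon stripped)))
      else if PySem.Str.startswith lower "- reasoning:" || PySem.Str.startswith lower "reasoning:" then
        (st.1, some (PySem.Dict.insert cd "reasoning" (pvAfterColon stripped)))
      else if PySem.Str.startswith lower "- updated:" || PySem.Str.startswith lower "updated:" then
        (st.1, some (PySem.Dict.insert cd "updated" (pvAfterColon stripped)))
      else if PySem.Str.startswith stripped "###" || PySem.Str.startswith stripped "## " then
        (if PySem.Dict.getD cd "name" "" ≠ "" then st.1 ++ [cd] else st.1, none)
      else st

def parse_decisions_from_output (output : String) : List (List (String × String)) :=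
  let lines := (PySem.Str.split? output "\n").getD []
  let st := lines.foldl pvAStep ([], none)
  (pvFlush st).map PySem.Dict.items

-- ===== PORT B =====
def pvIsHeader (s : String) : Bool :=
  PySem.Str.isIn "### DECISION:" s || PySem.Str.isIn "### Decision:" s

-- B's inner while-loop: fill the current block's dict from the (already advanced) remaining
-- lines; returns the dict and the lines the outer loop still has to scan
def pvBlock (d : PySem.Dict String String) :
    List String → PySem.Dict String String × List String
  | [] => (d, [])
  | line :: rest =>
    let t := PySem.Str.strip line
    if pvIsHeader t then (d, line :: rest)
    else
      let low := PySem.Str.lower t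
      if PySem.Str.startswith low "- conflict:" || PySem.Str.startswith low "conflict:" then
        pvBlock (PySem.Dict.insert d "conflict" (pvAfterColon t)) rest
      else if PySem.Str.startswith low "- resolution:" || PySem.Str.startswith low "resolution:" then
        pvBlock (PySem.Dict.insert d "resolution" (pvAfterColon t)) rest
      else if PySem.Str.startswith low "- reasoning:" || PySem.Str.startswith low "reasoning:" then
        pvBlock (PySem.Dict.insert d "reasoning" (pvAfterColon t)) rest
      else if PySem.Str.startswith low "- updated:" || PySem.Str.startswith low "updated:" then
        pvBlock (PySem.Dict.insert d "updated" (pvAfterColon t)) rest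
      else if PySem.Str.startswith t "###" || PySem.Str.startswith t "## " then (d, rest)
      else pvBlock d rest

-- cited by pvScan's decreasing_by (the inner loop only advances)
theorem pvBlock_len (d : PySem.Dict String String) (lines : List String) :
    (pvBlock d lines).2.length ≤ lines.length := by
  induction lines generalizing d with
  | nil => simp [pvBlock]
  | cons line rest ih =>
    simp only [pvBlock]
    split_ifs
    all_goals first
      | exact le_trans (ih _) (Nat.le_succ _)
      | simp

-- B's outer while-loop: skip to a header, consume its block, keep the dict if it has a name
def pvScan : List String → List (PySem.Dict String String)
  | [] => []
  | line :: rest =>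
    let s := PySem.Str.strip line
    if pvIsHeader s then
      let p := pvBlock (PySem.Dict.mk [("name", pvAfterColon s), ("conflict", ""),
                                       ("resolution", ""), ("reasoning", "")]) rest
      (if PySem.Dict.getD p.1 "name" "" ≠ "" then [p.1] else []) ++ pvScan p.2
    else pvScan rest
termination_by lines => lines.length
decreasing_by
  · exact Nat.lt_succ_of_le (pvBlock_len _ rest)
  · simp

def parse_decisions_from_output_alt (output : String) : List (List (String × String)) :=
  (pvScan ((PySem.Str.split? output "\n").getD [])).map PySem.Dict.items

-- ===== PRECONDITION & SPEC =====
def Spec_parse_decisions_from_output (output : String) (out : List (List (String × String))) : Prop := out = parse_decisions_from_output_alt output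
instance (output : String) (out : List (List (String × String))) : Decidable (Spec_parse_decisions_from_output output out) := by unfold Spec_parse_decisions_from_output; infer_instance

-- ===== CLAIM (what is proved, stated in full; the proofs are below) =====
def Claim_equal_parse_decisions_from_output : Prop := ∀ (output : String), Dom_parse_decisions_from_output output → Spec_parse_decisions_from_output output (parse_decisions_from_output output)

-- ===== LEMMAS AND PROOFS =====

-- a line containing '### DECISION:' or '### Decision:' contains a ':'
theorem pvHeaderColon {s : String}
    (h : (PySem.Str.isIn "### DECISION:" s || PySem.Str.isIn "### Decision:" s) = true) :
    PySem.Str.isIn ":" s = true := by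
  rw [Bool.or_eq_true] at h
  rcases h with h | h <;>
    exact (PySem.Str.isIn_iff_infix _ _).mpr
      (List.IsInfix.trans (by decide) ((PySem.Str.isIn_iff_infix _ _).mp h))

-- core equivalence: A's stateful loop, flushed, equals B's nested loops
theorem pvMain (n : Nat) (lines : List String) (hl : lines.length ≤ n) :
    (∀ acc, pvFlush (lines.foldl pvAStep (acc, none)) = acc ++ pvScan lines) ∧
    (∀ acc d, pvFlush (lines.foldl pvAStep (acc, some d)) =
      acc ++ (if PySem.Dict.getD (pvBlock d lines).1 "name" "" ≠ ""
              then [(pvBlock d lines).1] else []) ++ pvScan (pvBlock d lines).2) := by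
  induction n generalizing lines with
  | zero =>
    have : lines = [] := List.eq_nil_of_length_eq_zero (Nat.le_zero.mp hl)
    subst this
    refine ⟨fun acc => by simp [pvFlush, pvScan], fun acc d => ?_⟩
    simp only [pvBlock, pvScan, List.foldl_nil, pvFlush]
    split_ifs <;> simp
  | succ n ih =>
    cases lines with
    | nil =>
      refine ⟨fun acc => by simp [pvFlush, pvScan], fun acc d => ?_⟩
      simp only [pvBlock, pvScan, List.foldl_nil, pvFlush]
      split_ifs <;> simp
    | cons line rest =>
      have hr : rest.length ≤ n := Nat.succ_le_succ_iff.mp (by simpa using hl)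
      obtain ⟨ih1, ih2⟩ := ih rest hr
      by_cases hh : (PySem.Str.isIn "### DECISION:" (PySem.Str.strip line)
            || PySem.Str.isIn "### Decision:" (PySem.Str.strip line)) = true
      · -- header line
        have hcolon := pvHeaderColon hh
        constructor
        · intro acc
          simp only [List.foldl_cons, pvAStep, hh, if_true, hcolon]
          rw [ih2]
          simp only [pvScan, pvIsHeader, hh, if_true, pvFlush]
          simp
        · intro acc d
          simp only [List.foldl_cons, pvAStep, hh, if_true, hcolon]
          rw [ih2]
          simp only [pvBlock, pvIsHeader, hh, if_true, pvScan, pvFlush]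
          split_ifs <;> simp
      · -- not a header line
        have hh' := Bool.eq_false_iff.mpr hh
        have hs : pvIsHeader (PySem.Str.strip line) = false := by simpa [pvIsHeader] using hh
        constructor
        · intro acc
          simp only [List.foldl_cons, pvAStep, hh', Bool.false_eq_true, if_false]
          rw [ih1]
          simp only [pvScan, hs, Bool.false_eq_true, if_false]
        · intro acc d
          simp only [List.foldl_cons, pvAStep, hh', Bool.false_eq_true, if_false]
          simp only [pvBlock, hs, Bool.false_eq_true, if_false]
          by_cases h1 : (PySem.Str.startswith (PySem.Str.lower (PySem.Str.strip line)) "- conflict:"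
              || PySem.Str.startswith (PySem.Str.lower (PySem.Str.strip line)) "conflict:") = true
          · simp only [h1, if_true]; exact ih2 acc _
          have h1' := Bool.eq_false_iff.mpr h1
          by_cases h2 : (PySem.Str.startswith (PySem.Str.lower (PySem.Str.strip line)) "- resolution:"
              || PySem.Str.startswith (PySem.Str.lower (PySem.Str.strip line)) "resolution:") = true
          · simp only [h1', Bool.false_eq_true, if_false, h2, if_true]; exact ih2 acc _
          have h2' := Bool.eq_false_iff.mpr h2
          by_cases h3 : (PySem.Str.startswith (PySem.Str.lower (PySem.Str.strip line)) "- reasoning:"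
              || PySem.Str.startswith (PySem.Str.lower (PySem.Str.strip line)) "reasoning:") = true
          · simp only [h1', h2', Bool.false_eq_true, if_false, h3, if_true]; exact ih2 acc _
          have h3' := Bool.eq_false_iff.mpr h3
          by_cases h4 : (PySem.Str.startswith (PySem.Str.lower (PySem.Str.strip line)) "- updated:"
              || PySem.Str.startswith (PySem.Str.lower (PySem.Str.strip line)) "updated:") = true
          · simp only [h1', h2', h3', Bool.false_eq_true, if_false, h4, if_true]; exact ih2 acc _
          have h4' := Bool.eq_false_iff.mpr h4
          by_cases h5 : (PySem.Str.startswith (PySem.Str.strip line) "###"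
              || PySem.Str.startswith (PySem.Str.strip line) "## ") = true
          · -- terminator
            simp only [h1', h2', h3', h4', Bool.false_eq_true, if_false, h5, if_true]
            rw [ih1]
            split_ifs <;> simp
          · have h5' := Bool.eq_false_iff.mpr h5
            simp only [h1', h2', h3', h4', h5', Bool.false_eq_true, if_false]
            exact ih2 acc d

-- ===== VERDICT (by name: the statement is the Claim_ definition above) =====
theorem parse_decisions_from_output_spec : Claim_equal_parse_decisions_from_output := by
  intro output _
  unfold Spec_parse_decisions_from_output parse_decisions_from_output parse_decisions_from_output_alt
  show List.map PySem.Dict.items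
      (pvFlush (List.foldl pvAStep ([], none) ((PySem.Str.split? output "\n").getD []))) = _
  rw [(pvMain ((PySem.Str.split? output "\n").getD []).length _ le_rfl).1 []]
  simp
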